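-- pv_equiv track=rewrite | github.com/M-fatimaZohra/Personal-AI-Employee | level-gold/approval_watcher.py | _rewrite_status
-- ===== SOURCE A (Python) =====
-- def _rewrite_status(text: str, new_status: str) -> str:
--     """Return file content with the `status:` field in frontmatter replaced."""
--     lines = text.splitlines(keepends=True)
--     new_lines: list[str] = []
--     in_front = False
--     replaced = False
--     for i, line in enumerate(lines):
--         if i == 0 and line.strip() == "---":
--             in_front = True
--             new_lines.append(line)
--             continue
--         if in_front and line.strip() == "---":
--             in_front = False
--             new_lines.append(line)
--             continue
--         if in_front and line.startswith("status:") and not replaced: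
--             new_lines.append(f"status: {new_status}\n")
--             replaced = True
--         else:
--             new_lines.append(line)
--     if not replaced:
--         # Append status before closing --- if not found
--         new_lines.insert(1, f"status: {new_status}\n")
--     return "".join(new_lines)
-- ===== SOURCE B (Python) =====
-- def _rewrite_status(text: str, new_status: str) -> str:
--     """Return file content with the `status:` field in frontmatter replaced."""
--     lines = text.splitlines(keepends=True)
--     idx = None
--     if lines and lines[0].strip() == "---":
--         for i, line in enumerate(lines[1:], start=1):
--             if line.strip() == "---":
--                 break
--             if line.startswith("status:"):
--                 idx = i
--                 break
--     if idx is not None: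
--         lines[idx] = f"status: {new_status}\n"
--     else:
--         lines.insert(1, f"status: {new_status}\n")
--     return "".join(lines)
-- ===== Notes on version B (the rewrite author's own statement) =====
-- stated objective: simpler
-- what changed: B replaces A's one-pass state machine (in_front/replaced flags rebuilding the whole line list) by two phases: first locate the index of the status line inside the frontmatter (or None), then overwrite that line in place or insert at index 1, and join.
import Mathlib
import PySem

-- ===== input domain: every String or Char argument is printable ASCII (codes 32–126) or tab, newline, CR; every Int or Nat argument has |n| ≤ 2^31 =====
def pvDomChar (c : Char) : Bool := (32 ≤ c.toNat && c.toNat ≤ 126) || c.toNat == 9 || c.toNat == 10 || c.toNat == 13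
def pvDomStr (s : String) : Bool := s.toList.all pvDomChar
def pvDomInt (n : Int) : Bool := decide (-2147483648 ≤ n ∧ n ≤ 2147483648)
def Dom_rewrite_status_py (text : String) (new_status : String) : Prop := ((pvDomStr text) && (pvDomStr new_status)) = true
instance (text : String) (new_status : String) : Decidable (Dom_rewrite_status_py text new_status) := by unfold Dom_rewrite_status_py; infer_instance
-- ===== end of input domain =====

-- B locates the status-line index first and then edits the list in place, instead of A's
-- state-machine rebuild; same return value everywhere (objective: simpler decomposition).

-- shared helper for the Python builtin text.splitlines(keepends=True):
-- exact on Dom, whose only line-break characters are '\n', '\r' and '\r\n'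
def pvSplitKeep : List Char → List Char → List (List Char)
  | acc, [] => if acc = [] then [] else [acc.reverse]
  | acc, '\n' :: rest => (acc.reverse ++ ['\n']) :: pvSplitKeep [] rest
  | acc, '\r' :: '\n' :: rest => (acc.reverse ++ ['\r', '\n']) :: pvSplitKeep [] rest
  | acc, '\r' :: rest => (acc.reverse ++ ['\r']) :: pvSplitKeep [] rest
  | acc, c :: rest => pvSplitKeep (c :: acc) rest

-- the replacement line f"status: {new_status}\n"
def pvStatusLine (ns : List Char) : List Char := "status: ".toList ++ ns ++ ['\n']

-- ===== PORT A =====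
-- the for-loop of A: state = (new_lines, in_front, replaced), with the enumerate index i
def pvLoopA (ns : List Char) : List (List Char) → Nat → List (List Char) → Bool → Bool →
    List (List Char) × Bool
  | [], _, acc, _, replaced => (acc, replaced)
  | line :: rest, i, acc, in_front, replaced =>
    if i = 0 ∧ PySem.Chars.strip line = "---".toList then
      pvLoopA ns rest (i+1) (acc ++ [line]) true replaced
    else if in_front ∧ PySem.Chars.strip line = "---".toList then
      pvLoopA ns rest (i+1) (acc ++ [line]) false replaced
    else if in_front ∧ PySem.Chars.startswith line "status:".toList ∧ replaced = false then
      pvLoopA ns rest (i+1) (acc ++ [pvStatusLine ns]) in_front true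
    else
      pvLoopA ns rest (i+1) (acc ++ [line]) in_front replaced

def rewrite_status_py (text : String) (new_status : String) : String :=
  let lines := pvSplitKeep [] text.toList
  let (new_lines, replaced) := pvLoopA new_status.toList lines 0 [] false false
  let final := if replaced = false then PySem.List.insert new_lines 1 (pvStatusLine new_status.toList) else new_lines
  String.mk (PySem.Chars.join [] final)

-- ===== PORT B =====
-- B's for-loop: scan lines[1:] with absolute index i, stop at closing '---' or first 'status:' line
def pvFindB : List (List Char) → Nat → Option Nat
  | [], _ => none
  | line :: rest, i =>
    if PySem.Chars.strip line = "---".toList then none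
    else if PySem.Chars.startswith line "status:".toList then some i
    else pvFindB rest (i+1)

def rewrite_status_py_alt (text : String) (new_status : String) : String :=
  let lines := pvSplitKeep [] text.toList
  let idx : Option Nat :=
    match lines with
    | [] => none
    | l0 :: rest => if PySem.Chars.strip l0 = "---".toList then pvFindB rest 1 else none
  let final :=
    match idx with
    | some i => lines.set i (pvStatusLine new_status.toList)
    | none => PySem.List.insert lines 1 (pvStatusLine new_status.toList)
  String.mk (PySem.Chars.join [] final)

-- ===== PRECONDITION & SPEC =====
def Spec_rewrite_status_py (text : String) (new_status : String) (out : String) : Prop := out = rewrite_status_py_alt text new_status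
instance (text : String) (new_status : String) (out : String) : Decidable (Spec_rewrite_status_py text new_status out) := by unfold Spec_rewrite_status_py; infer_instance

-- ===== CLAIM (what is proved, stated in full; the proofs are below) =====
def Claim_equal_rewrite_status_py : Prop := ∀ (text : String) (new_status : String), Dom_rewrite_status_py text new_status → Spec_rewrite_status_py text new_status (rewrite_status_py text new_status)

-- ===== LEMMAS AND PROOFS =====

-- pvFindB shifts its accumulator index
theorem pvFindB_shift (ls : List (List Char)) (i : Nat) :
    pvFindB ls i = (pvFindB ls 0).map (· + i) := by
  induction ls generalizing i with
  | nil => simp [pvFindB]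
  | cons l rest ih =>
    simp only [pvFindB]
    split_ifs with h1 h2
    · simp
    · simp
    · rw [ih (i+1), ih 1]
      cases pvFindB rest 0 <;> simp <;> omega

-- once replaced = true, A's loop appends every remaining line unchanged
theorem pvLoopA_replaced (ns : List Char) (ls : List (List Char)) (i : Nat) (hi : i ≠ 0)
    (acc : List (List Char)) (inf : Bool) :
    pvLoopA ns ls i acc inf true = (acc ++ ls, true) := by
  induction ls generalizing i acc inf with
  | nil => simp [pvLoopA]
  | cons l rest ih =>
    simp only [pvLoopA, hi, false_and, if_false]
    split_ifs with h2 h3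
    · rw [ih _ (by omega)]; simp
    · simp at h3
    · rw [ih _ (by omega)]; simp

-- with in_front = false (and i ≠ 0, so it can never be set), A's loop copies everything
theorem pvLoopA_out (ns : List Char) (ls : List (List Char)) (i : Nat) (hi : i ≠ 0)
    (acc : List (List Char)) (r : Bool) :
    pvLoopA ns ls i acc false r = (acc ++ ls, r) := by
  induction ls generalizing i acc with
  | nil => simp [pvLoopA]
  | cons l rest ih =>
    simp only [pvLoopA, hi, false_and, if_false]
    rw [ih _ (by omega)]; simp

-- inside the frontmatter with replaced = false, A's loop result is described by B's search
theorem pvLoopA_in (ns : List Char) (ls : List (List Char)) (i : Nat) (hi : i ≠ 0)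
    (acc : List (List Char)) :
    pvLoopA ns ls i acc true false =
      match pvFindB ls 0 with
      | some k => (acc ++ ls.set k (pvStatusLine ns), true)
      | none => (acc ++ ls, false) := by
  induction ls generalizing i acc with
  | nil => simp [pvLoopA, pvFindB]
  | cons l rest ih =>
    by_cases hdash : PySem.Chars.strip l = "---".toList
    · simp only [pvLoopA, pvFindB, hi, false_and, if_false, hdash, true_and, if_true]
      rw [pvLoopA_out ns rest (i+1) (by omega)]
      simp
    · by_cases hst : PySem.Chars.startswith l "status:".toList
      · simp only [pvLoopA, pvFindB, hi, false_and, if_false, true_and, if_neg hdash,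
          hst, and_true, if_true]
        rw [pvLoopA_replaced ns rest (i+1) (by omega)]
        simp
      · simp only [pvLoopA, pvFindB, hi, false_and, if_false, true_and, if_neg hdash,
          hst, false_and, if_false, if_neg hst]
        rw [ih (i+1) (by omega), pvFindB_shift rest 1]
        cases pvFindB rest 0 <;> simp

-- ===== VERDICT (by name: the statement is the Claim_ definition above) =====
theorem rewrite_status_py_spec : Claim_equal_rewrite_status_py := by
  intro text ns _
  unfold Spec_rewrite_status_py rewrite_status_py rewrite_status_py_alt
  cases hls : pvSplitKeep [] text.toList with
  | nil => simp [pvLoopA]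
  | cons l0 rest =>
    by_cases hdash : PySem.Chars.strip l0 = "---".toList
    · simp only [pvLoopA, hdash, and_self, if_true, if_pos hdash, true_and]
      rw [pvLoopA_in ns.toList rest 1 (by omega), pvFindB_shift rest 1]
      cases pvFindB rest 0 <;> simp
    · have h : pvLoopA ns.toList rest 1 [l0] false false = (l0 :: rest, false) := by
        simpa using pvLoopA_out ns.toList rest 1 (by omega) [l0] false
      have hd2 : ¬ PySem.Chars.strip l0 = ['-', '-', '-'] := by simpa using hdash
      simp [pvLoopA, hd2, h]
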